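-- pv_equiv track=rewrite | github.com/gmgmgun/Algorithm-Exercises | 백준/Silver/2304. 창고 다각형/창고 다각형.py | smallest_warehouse_area
-- ===== SOURCE A (Python) =====
-- def smallest_warehouse_area(pillars):
--     pillars.sort()
--
--     max_height_index = max(range(len(pillars)), key=lambda i: pillars[i][1])
--
--     area = 0
--     current_height = 0
--
--     for i in range(max_height_index):
--         if pillars[i][1] > current_height:
--             current_height = pillars[i][1]
--         area += current_height * (pillars[i + 1][0] - pillars[i][0])
--
--     current_height = 0
--
--     for i in range(len(pillars) - 1, max_height_index, -1):
--         if pillars[i][1] > current_height: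
--             current_height = pillars[i][1]
--         area += current_height * (pillars[i][0] - pillars[i - 1][0])
--
--     area += pillars[max_height_index][1]
--
--     return area
-- ===== SOURCE B (Python) =====
-- from itertools import accumulate
--
-- def smallest_warehouse_area(pillars):
--     pillars.sort()
--     xs = [x for x, _ in pillars]
--     hs = [h for _, h in pillars]
--     # prefix[k] = running max of hs[:k] (ground level 0); suffix[k] = same for hs[k:]
--     prefix = list(accumulate(hs, max, initial=0))
--     suffix = list(accumulate(hs[::-1], max, initial=0))[::-1]
--     return max(hs) + sum(min(prefix[j + 1], suffix[j + 1]) * (xs[j + 1] - xs[j])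
--                          for j in range(len(pillars) - 1))
-- ===== Notes on version B (the rewrite author's own statement) =====
-- stated objective: alternative
-- what changed: Replaces locating the peak index and the two directional running-max sweeps around it by prefix/suffix running-max tables built once plus a single pass over consecutive gaps taking min(prefix, suffix); both still sort in place first.
import Mathlib
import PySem

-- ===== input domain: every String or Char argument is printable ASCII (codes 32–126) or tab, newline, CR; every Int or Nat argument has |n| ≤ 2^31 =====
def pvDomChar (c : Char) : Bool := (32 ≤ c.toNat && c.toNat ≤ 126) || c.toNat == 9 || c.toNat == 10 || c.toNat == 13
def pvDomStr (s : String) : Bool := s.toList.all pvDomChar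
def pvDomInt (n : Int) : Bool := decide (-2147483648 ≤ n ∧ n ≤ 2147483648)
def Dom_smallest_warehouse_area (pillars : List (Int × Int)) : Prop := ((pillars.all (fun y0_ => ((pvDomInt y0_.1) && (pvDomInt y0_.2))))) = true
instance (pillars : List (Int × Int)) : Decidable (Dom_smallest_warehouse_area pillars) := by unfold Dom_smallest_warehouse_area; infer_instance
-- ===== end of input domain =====

-- B replaces A's peak-splitting double sweep by prefix/suffix running-max tables and one pass
-- over the gaps (objective: alternative decomposition, same cost). Both Pythons sort the list
-- in place (the equivalence proved here is about the return value; B performs the same mutation).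

-- ===== PORT A =====
-- A-side helpers: the indexing shorthands and the two loop bodies of A, named for the proofs
def pvH (s : List (Int × Int)) (i : Int) : Int := (PySem.List.pyGetD s i (0, 0)).2
def pvX (s : List (Int × Int)) (i : Int) : Int := (PySem.List.pyGetD s i (0, 0)).1

-- body of A's first for-loop: state = (area, current_height), i ascending
def pvStepUpA (s : List (Int × Int)) (st : Int × Int) (i : Int) : Int × Int :=
  let cur := if pvH s i > st.2 then pvH s i else st.2
  (st.1 + cur * (pvX s (i + 1) - pvX s i), cur)

-- body of A's second for-loop: i descending
def pvStepDnA (s : List (Int × Int)) (st : Int × Int) (i : Int) : Int × Int :=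
  let cur := if pvH s i > st.2 then pvH s i else st.2
  (st.1 + cur * (pvX s i - pvX s (i - 1)), cur)

-- .getD 0 on the argmax is unreachable: Python's max(...) raises ValueError exactly on [], excluded by Pre_
def smallest_warehouse_area (pillars : List (Int × Int)) : Int :=
  let s := PySem.List.sorted2 pillars (fun p => p.1) (fun p => p.2)
  let m := (PySem.List.max? (PySem.List.pyRange 0 (PySem.List.len s)) (fun i => pvH s i)).getD 0
  let st1 := (PySem.List.pyRange 0 m).foldl (pvStepUpA s) ((0 : Int), (0 : Int))
  let st2 := (PySem.List.pyRange (PySem.List.len s - 1) m (-1)).foldl (pvStepDnA s) (st1.1, (0 : Int))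
  st2.1 + pvH s m

-- ===== PORT B =====
-- hs[::-1] is ported as .reverse (exact); accumulate(·, max, initial=0) is List.scanl max 0;
-- max(hs) raises ValueError exactly on [], excluded by Pre_ (.getD 0 unreachable)
def smallest_warehouse_area_alt (pillars : List (Int × Int)) : Int :=
  let s := PySem.List.sorted2 pillars (fun p => p.1) (fun p => p.2)
  let xs := s.map (fun p => p.1)
  let hs := s.map (fun p => p.2)
  let pre := List.scanl max 0 hs
  let suf := (List.scanl max 0 hs.reverse).reverse
  (PySem.List.max? hs (fun x => x)).getD 0 +
    ((PySem.List.pyRange 0 (PySem.List.len s - 1)).map (fun j =>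
        min (PySem.List.pyGetD pre (j + 1) 0) (PySem.List.pyGetD suf (j + 1) 0) *
          (PySem.List.pyGetD xs (j + 1) 0 - PySem.List.pyGetD xs j 0))).sum

-- ===== PRECONDITION & SPEC =====
-- Pre_ excludes only the empty list, on which Python A raises ValueError (max() of an empty sequence)
def Pre_smallest_warehouse_area (pillars : List (Int × Int)) : Prop := pillars ≠ []
instance (pillars : List (Int × Int)) : Decidable (Pre_smallest_warehouse_area pillars) := by unfold Pre_smallest_warehouse_area; infer_instance
def pvWitness_smallest_warehouse_area : (List (Int × Int)) := [(3, 5), (0, 2), (6, 1)]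
def Spec_smallest_warehouse_area (pillars : List (Int × Int)) (out : Int) : Prop := out = smallest_warehouse_area_alt pillars
instance (pillars : List (Int × Int)) (out : Int) : Decidable (Spec_smallest_warehouse_area pillars out) := by unfold Spec_smallest_warehouse_area; infer_instance

-- ===== CLAIM (what is proved, stated in full; the proofs are below) =====
def Claim_equal_smallest_warehouse_area : Prop := ∀ (pillars : List (Int × Int)), Dom_smallest_warehouse_area pillars → Pre_smallest_warehouse_area pillars → Spec_smallest_warehouse_area pillars (smallest_warehouse_area pillars)

-- ===== LEMMAS AND PROOFS =====

-- proof-side abbreviations: clamped prefix / suffix maxima of the height list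
def pvPre (hs : List Int) (k : Nat) : Int := (hs.take k).foldl max 0
def pvSuf (hs : List Int) (k : Nat) : Int := (hs.drop k).foldl max 0

-- the two port bodies as functions of the sorted list
def pvABody (s : List (Int × Int)) : Int :=
  let m := (PySem.List.max? (PySem.List.pyRange 0 (PySem.List.len s)) (fun i => pvH s i)).getD 0
  let st1 := (PySem.List.pyRange 0 m).foldl (pvStepUpA s) ((0 : Int), (0 : Int))
  let st2 := (PySem.List.pyRange (PySem.List.len s - 1) m (-1)).foldl (pvStepDnA s) (st1.1, (0 : Int))
  st2.1 + pvH s m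

def pvBBody (s : List (Int × Int)) : Int :=
  let xs := s.map (fun p => p.1)
  let hs := s.map (fun p => p.2)
  let pre := List.scanl max 0 hs
  let suf := (List.scanl max 0 hs.reverse).reverse
  (PySem.List.max? hs (fun x => x)).getD 0 +
    ((PySem.List.pyRange 0 (PySem.List.len s - 1)).map (fun j =>
        min (PySem.List.pyGetD pre (j + 1) 0) (PySem.List.pyGetD suf (j + 1) 0) *
          (PySem.List.pyGetD xs (j + 1) 0 - PySem.List.pyGetD xs j 0))).sum

theorem portA_eq (pillars : List (Int × Int)) :
    smallest_warehouse_area pillars = pvABody (PySem.List.sorted2 pillars (fun p => p.1) (fun p => p.2)) := rfl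

theorem portB_eq (pillars : List (Int × Int)) :
    smallest_warehouse_area_alt pillars = pvBBody (PySem.List.sorted2 pillars (fun p => p.1) (fun p => p.2)) := rfl

theorem pvMaxIf (c x : Int) : (if x > c then x else c) = max c x := by
  split_ifs <;> omega

theorem foldl_max_init (l : List Int) (u v : Int) :
    l.foldl max (max u v) = max u (l.foldl max v) := by
  induction l generalizing v with
  | nil => rfl
  | cons a l ih => simpa [List.foldl, max_assoc] using ih (max v a)

theorem foldl_max_le (l : List Int) (c M : Int) (hc : c ≤ M) (h : ∀ y ∈ l, y ≤ M) :
    l.foldl max c ≤ M := by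
  induction l generalizing c with
  | nil => exact hc
  | cons a l ih =>
      exact ih _ (max_le hc (h a (by simp))) (fun y hy => h y (by simp [hy]))

theorem foldl_max_reverse (l : List Int) (c : Int) : l.reverse.foldl max c = l.foldl max c := by
  induction l generalizing c with
  | nil => rfl
  | cons a l ih =>
      simp only [List.reverse_cons, List.foldl_append, List.foldl, ih]
      rw [show max c a = max a c from max_comm c a, foldl_max_init]
      rw [max_comm]

-- (pyRange 0 k).map (xs[·]) is xs.take k
theorem mapRange_take {α : Type} (xs : List α) (d : α) (k : Nat) (hk : k ≤ xs.length) :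
    (PySem.List.pyRange 0 (k : Int)).map (fun i => PySem.List.pyGetD xs i d) = xs.take k := by
  induction k with
  | zero => simp [PySem.List.pyRange_one_eq_nil]
  | succ k ih =>
      have h1 : ((k + 1 : Nat) : Int) = (k : Int) + 1 := by push_cast; ring
      rw [h1, PySem.List.pyRange_one_succ_right (by positivity), List.map_append]
      have hk' : k < xs.length := by omega
      rw [ih (by omega), List.take_add_one]
      simp [PySem.List.pyGetD_natCast, List.getD_eq_getElem?_getD, List.getElem?_eq_getElem hk']

theorem scanl_max_getD (l : List Int) (k : Nat) (c : Int) (hk : k ≤ l.length) :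
    (List.scanl max c l).getD k 0 = (l.take k).foldl max c := by
  induction l generalizing k c with
  | nil =>
      have : k = 0 := by simpa using hk
      subst this; simp
  | cons a l ih =>
      cases k with
      | zero => simp
      | succ k => simpa using ih k (max c a) (by simpa using hk)

theorem suf_getD (hs : List Int) (k : Nat) (hk : k ≤ hs.length) :
    ((List.scanl max 0 hs.reverse).reverse).getD k 0 = pvSuf hs k := by
  have hlen : (List.scanl max 0 hs.reverse).length = hs.length + 1 := by
    simp
  rw [List.getD_eq_getElem?_getD, List.getElem?_reverse (by rw [hlen]; omega), hlen]
  have h2 : hs.length + 1 - 1 - k = hs.length - k := by omega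
  rw [h2, ← List.getD_eq_getElem?_getD,
      scanl_max_getD _ _ _ (by rw [List.length_reverse]; omega),
      ← List.reverse_drop, foldl_max_reverse]
  rfl

-- up-loop characterisation: running area of A's first loop as a sum of running-max × gap terms
theorem upLoop (s : List (Int × Int)) :
    ∀ (t : Nat) (a b ar c : Int), (b - a).toNat = t →
    ((PySem.List.pyRange a b).foldl (pvStepUpA s) (ar, c)).1
      = ar + ((PySem.List.pyRange a b).map
          (fun i => ((PySem.List.pyRange a (i + 1)).map (pvH s)).foldl max c * (pvX s (i + 1) - pvX s i))).sum := by
  intro t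
  induction t with
  | zero =>
      intro a b ar c h
      rw [PySem.List.pyRange_one_eq_nil (by omega)]
      simp
  | succ t ih =>
      intro a b ar c h
      rw [PySem.List.pyRange_one_cons (show a < b by omega)]
      simp only [List.foldl_cons, List.map_cons, List.sum_cons]
      have hstep : pvStepUpA s (ar, c) a
          = (ar + max c (pvH s a) * (pvX s (a + 1) - pvX s a), max c (pvH s a)) := by
        simp [pvStepUpA, pvMaxIf]
      rw [hstep, ih (a + 1) b _ _ (by omega)]
      have hhead : ((PySem.List.pyRange a (a + 1)).map (pvH s)).foldl max c = max c (pvH s a) := by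
        rw [PySem.List.pyRange_one_singleton]; rfl
      have htail : ∀ i ∈ PySem.List.pyRange (a + 1) b,
          ((PySem.List.pyRange (a + 1) (i + 1)).map (pvH s)).foldl max (max c (pvH s a))
              * (pvX s (i + 1) - pvX s i)
            = ((PySem.List.pyRange a (i + 1)).map (pvH s)).foldl max c * (pvX s (i + 1) - pvX s i) := by
        intro i hi
        have hai : a < i + 1 := by
          have := (PySem.List.mem_pyRange_one.mp hi).1; omega
        rw [PySem.List.pyRange_one_cons hai]
        rfl
      rw [List.map_congr_left htail, hhead]
      ring

-- down-loop characterisation: A's second loop, i descending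
theorem dnLoop (s : List (Int × Int)) :
    ∀ (t : Nat) (a b ar c : Int), (a - b).toNat = t →
    ((PySem.List.pyRange a b (-1)).foldl (pvStepDnA s) (ar, c)).1
      = ar + ((PySem.List.pyRange a b (-1)).map
          (fun i => ((PySem.List.pyRange i (a + 1)).map (pvH s)).foldl max c * (pvX s i - pvX s (i - 1)))).sum := by
  intro t
  induction t with
  | zero =>
      intro a b ar c h
      rw [PySem.List.pyRange_neg_one_eq_nil (by omega)]
      simp
  | succ t ih =>
      intro a b ar c h
      rw [PySem.List.pyRange_neg_one_cons (show b < a by omega)]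
      simp only [List.foldl_cons, List.map_cons, List.sum_cons]
      have hstep : pvStepDnA s (ar, c) a
          = (ar + max c (pvH s a) * (pvX s a - pvX s (a - 1)), max c (pvH s a)) := by
        simp [pvStepDnA, pvMaxIf]
      rw [hstep, ih (a - 1) b _ _ (by omega)]
      have hhead : ((PySem.List.pyRange a (a + 1)).map (pvH s)).foldl max c = max c (pvH s a) := by
        rw [PySem.List.pyRange_one_singleton]; rfl
      have htail : ∀ i ∈ PySem.List.pyRange (a - 1) b (-1),
          ((PySem.List.pyRange i (a - 1 + 1)).map (pvH s)).foldl max (max c (pvH s a))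
              * (pvX s i - pvX s (i - 1))
            = ((PySem.List.pyRange i (a + 1)).map (pvH s)).foldl max c * (pvX s i - pvX s (i - 1)) := by
        intro i hi
        have hia : i ≤ a - 1 := (PySem.List.mem_pyRange_neg_one.mp hi).2
        have h1 : a - 1 + 1 = a := by ring
        rw [h1, PySem.List.pyRange_one_succ_right (show i ≤ a by omega), List.map_append,
            List.foldl_append]
        rw [max_comm c (pvH s a), foldl_max_init]
        simp only [List.map_cons, List.map_nil, List.foldl_cons, List.foldl_nil]
        rw [max_comm]
      rw [List.map_congr_left htail, hhead]
      ring

theorem pyRange_shift (a b : Int) :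
    PySem.List.pyRange (a + 1) (b + 1) = (PySem.List.pyRange a b).map (fun j => j + 1) := by
  rw [PySem.List.pyRange_one, PySem.List.pyRange_one, List.map_map]
  have : b + 1 - (a + 1) = b - a := by ring
  rw [this]
  exact List.map_congr_left (fun k _ => by simp; ring)

theorem getD_mem_drop (l : List Int) (k j : Nat) (hkj : k ≤ j) (hj : j < l.length) :
    l.getD j 0 ∈ l.drop k := by
  rw [List.getD_eq_getElem?_getD, List.getElem?_eq_getElem hj, Option.getD_some,
      List.mem_iff_getElem]
  refine ⟨j - k, by rw [List.length_drop]; omega, ?_⟩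
  rw [List.getElem_drop]
  simp only [show k + (j - k) = j from by omega]

theorem getD_mem_take (l : List Int) (k j : Nat) (hjk : j < k) (hj : j < l.length) :
    l.getD j 0 ∈ l.take k := by
  rw [List.getD_eq_getElem?_getD, List.getElem?_eq_getElem hj, Option.getD_some,
      List.mem_iff_getElem]
  exact ⟨j, by rw [List.length_take]; omega, List.getElem_take⟩

-- the core equivalence, over the (already sorted) list
theorem core (s : List (Int × Int)) (hne : s ≠ []) : pvABody s = pvBBody s := by
  have hlen0 : 0 < s.length := List.length_pos_iff.mpr hne
  simp only [pvABody, pvBBody]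
  obtain ⟨m, hm⟩ : ∃ m, PySem.List.max? (PySem.List.pyRange 0 (PySem.List.len s))
      (fun i => pvH s i) = some m := by
    cases h : PySem.List.max? (PySem.List.pyRange 0 (PySem.List.len s)) (fun i => pvH s i) with
    | some m => exact ⟨m, rfl⟩
    | none =>
        exfalso
        have h0 := (PySem.List.max?_eq_none_iff _ _).mp h
        have hlen := PySem.List.length_pyRange_one 0 (PySem.List.len s)
        rw [h0] at hlen
        simp [PySem.List.len] at hlen
        omega
  obtain ⟨M, hM⟩ : ∃ M, PySem.List.max? (s.map (fun p => p.2)) (fun x => x) = some M := by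
    cases h : PySem.List.max? (s.map (fun p => p.2)) (fun x => x) with
    | some M => exact ⟨M, rfl⟩
    | none =>
        exfalso
        have h0 := (PySem.List.max?_eq_none_iff _ _).mp h
        simp only [List.map_eq_nil_iff] at h0
        exact hne h0
  rw [hm, hM, Option.getD_some, Option.getD_some]
  set hs : List Int := s.map (fun p => p.2) with hhs
  have hhslen : hs.length = s.length := by rw [hhs, List.length_map]
  have hmrange := PySem.List.max?_mem hm
  have hm0 : (0 : Int) ≤ m := (PySem.List.mem_pyRange_one.mp hmrange).1
  have hmn : m < PySem.List.len s := (PySem.List.mem_pyRange_one.mp hmrange).2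
  have hnlen : PySem.List.len s = (s.length : Int) := rfl
  rw [hnlen] at hmn
  have hmax : ∀ i : Int, 0 ≤ i → i < (s.length : Int) → pvH s i ≤ pvH s m := by
    intro i h1 h2
    exact PySem.List.max?_isMax hm i (PySem.List.mem_pyRange_one.mpr ⟨h1, by rw [hnlen]; omega⟩)
  have hMub : ∀ y ∈ hs, y ≤ M := PySem.List.max?_isMax hM
  have hMmem : M ∈ hs := PySem.List.max?_mem hM
  have hpyH : ∀ i : Int, PySem.List.pyGetD hs i 0 = pvH s i := fun i =>
    PySem.List.pyGetD_map (fun p : Int × Int => p.2) s i (0, 0)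
  have hpyX : ∀ i : Int, PySem.List.pyGetD (s.map (fun p => p.1)) i 0 = pvX s i := fun i =>
    PySem.List.pyGetD_map (fun p : Int × Int => p.1) s i (0, 0)
  have hHidx : ∀ k : Nat, pvH s (k : Int) = hs.getD k 0 := by
    intro k
    rw [← hpyH, PySem.List.pyGetD_natCast]
  have hHmD : pvH s m = hs.getD m.toNat 0 := by
    rw [← hHidx m.toNat]
    congr 1
    omega
  have hHM : pvH s m = M := by
    apply le_antisymm
    · apply hMub
      rw [hHmD, List.getD_eq_getElem?_getD,
          List.getElem?_eq_getElem (show m.toNat < hs.length by omega), Option.getD_some]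
      exact List.getElem_mem _
    · obtain ⟨km, hkm, hkmM⟩ := List.mem_iff_getElem.mp hMmem
      have h1 : M = hs.getD km 0 := by
        rw [List.getD_eq_getElem?_getD, List.getElem?_eq_getElem hkm, Option.getD_some, hkmM]
      rw [h1, ← hHidx km]
      exact hmax _ (by omega) (by omega)
  have hMD : hs.getD m.toNat 0 = M := by rw [← hHmD, hHM]
  -- min resolution
  have hminL : ∀ k : Nat, k ≤ m.toNat → min (pvPre hs k) (pvSuf hs k) = pvPre hs k := by
    intro k hkm
    apply min_eq_left
    apply foldl_max_le
    · exact (PySem.List.le_foldl_max _ _).1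
    · intro y hy
      have hyM : y ≤ M := hMub y (List.mem_of_mem_take hy)
      have hMsuf : M ≤ pvSuf hs k := by
        apply (PySem.List.le_foldl_max (hs.drop k) 0).2
        rw [← hMD]
        exact getD_mem_drop hs k m.toNat hkm (by omega)
      omega
  have hminR : ∀ k : Nat, m.toNat < k → min (pvPre hs k) (pvSuf hs k) = pvSuf hs k := by
    intro k hkm
    apply min_eq_right
    apply foldl_max_le
    · exact (PySem.List.le_foldl_max _ _).1
    · intro y hy
      have hyM : y ≤ M := hMub y (List.mem_of_mem_drop hy)
      have hMpre : M ≤ pvPre hs k := by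
        apply (PySem.List.le_foldl_max (hs.take k) 0).2
        rw [← hMD]
        exact getD_mem_take hs k m.toNat hkm (by omega)
      omega
  -- rewrite A's two loops into sums
  rw [dnLoop s (PySem.List.len s - 1 - m).toNat (PySem.List.len s - 1) m _ 0 rfl]
  rw [upLoop s (m - 0).toNat 0 m 0 0 rfl]
  simp only [show PySem.List.len s - 1 + 1 = PySem.List.len s from by ring]
  -- canonicalise A's first sum
  have hEqUp : ((PySem.List.pyRange 0 m).map
        (fun i => ((PySem.List.pyRange 0 (i + 1)).map (pvH s)).foldl max 0
          * (pvX s (i + 1) - pvX s i))).sum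
      = ((PySem.List.pyRange 0 m).map
        (fun j => pvPre hs (j.toNat + 1) * (pvX s (j + 1) - pvX s j))).sum := by
    apply congrArg List.sum
    apply List.map_congr_left
    intro j hj
    obtain ⟨hj0, hjm⟩ := PySem.List.mem_pyRange_one.mp hj
    have hfold : ((PySem.List.pyRange 0 (j + 1)).map (pvH s)).foldl max 0
        = pvPre hs (j.toNat + 1) := by
      rw [List.map_congr_left (fun i (_ : i ∈ PySem.List.pyRange 0 (j + 1)) => (hpyH i).symm)]
      rw [show j + 1 = ((j.toNat + 1 : Nat) : Int) from by omega,
          mapRange_take hs 0 (j.toNat + 1) (by omega)]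
      rfl
    rw [hfold]
  -- canonicalise A's second sum: reverse the countdown range and shift the index
  have hlenhs : PySem.List.len s = PySem.List.len hs := by
    simp only [PySem.List.len, hhslen]
  have hEqDn : ((PySem.List.pyRange (PySem.List.len s - 1) m (-1)).map
        (fun i => ((PySem.List.pyRange i (PySem.List.len s)).map (pvH s)).foldl max 0
          * (pvX s i - pvX s (i - 1)))).sum
      = ((PySem.List.pyRange m (PySem.List.len s - 1)).map
        (fun j => pvSuf hs (j.toNat + 1) * (pvX s (j + 1) - pvX s j))).sum := by
    rw [PySem.List.pyRange_neg_one_eq_reverse, List.map_reverse, List.sum_reverse]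
    simp only [show PySem.List.len s - 1 + 1 = PySem.List.len s from by ring]
    have hshift : PySem.List.pyRange (m + 1) (PySem.List.len s)
        = (PySem.List.pyRange m (PySem.List.len s - 1)).map (fun j => j + 1) := by
      have h2 := pyRange_shift m (PySem.List.len s - 1)
      rwa [show PySem.List.len s - 1 + 1 = PySem.List.len s from by ring] at h2
    rw [hshift, List.map_map]
    apply congrArg List.sum
    apply List.map_congr_left
    intro j hj
    obtain ⟨hjm, hjn⟩ := PySem.List.mem_pyRange_one.mp hj
    rw [hnlen] at hjn
    simp only [Function.comp]
    have hfold : ((PySem.List.pyRange (j + 1) (PySem.List.len s)).map (pvH s)).foldl max 0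
        = pvSuf hs (j.toNat + 1) := by
      rw [List.map_congr_left
            (fun i (_ : i ∈ PySem.List.pyRange (j + 1) (PySem.List.len s)) => (hpyH i).symm)]
      rw [hlenhs, PySem.List.map_pyGetD_pyRange hs 0 (show (0 : Int) ≤ j + 1 by omega)]
      rw [show (j + 1).toNat = j.toNat + 1 from by omega]
      rfl
    rw [hfold, show j + 1 - 1 = j from by ring]
  rw [hEqUp, hEqDn]
  -- canonicalise B's sum
  have hEqB : ((PySem.List.pyRange 0 (PySem.List.len s - 1)).map
        (fun j => min (PySem.List.pyGetD (List.scanl max 0 hs) (j + 1) 0)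
            (PySem.List.pyGetD ((List.scanl max 0 hs.reverse).reverse) (j + 1) 0) *
          (PySem.List.pyGetD (s.map (fun p => p.1)) (j + 1) 0
            - PySem.List.pyGetD (s.map (fun p => p.1)) j 0))).sum
      = ((PySem.List.pyRange 0 (PySem.List.len s - 1)).map
        (fun j => min (pvPre hs (j.toNat + 1)) (pvSuf hs (j.toNat + 1))
          * (pvX s (j + 1) - pvX s j))).sum := by
    apply congrArg List.sum
    apply List.map_congr_left
    intro j hj
    obtain ⟨hj0, hjn⟩ := PySem.List.mem_pyRange_one.mp hj
    rw [hnlen] at hjn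
    have hcast : j + 1 = ((j.toNat + 1 : Nat) : Int) := by omega
    have hpre : PySem.List.pyGetD (List.scanl max 0 hs) (j + 1) 0 = pvPre hs (j.toNat + 1) := by
      rw [hcast, PySem.List.pyGetD_natCast]
      exact scanl_max_getD hs _ 0 (by omega)
    have hsuf : PySem.List.pyGetD ((List.scanl max 0 hs.reverse).reverse) (j + 1) 0
        = pvSuf hs (j.toNat + 1) := by
      rw [hcast, PySem.List.pyGetD_natCast]
      exact suf_getD hs _ (by omega)
    rw [hpre, hsuf, hpyX (j + 1), hpyX j]
  rw [hEqB]
  -- split B's sum at the peak index and resolve each min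
  rw [PySem.List.pyRange_one_append 0 m (PySem.List.len s - 1) hm0 (by rw [hnlen]; omega),
      List.map_append, List.sum_append]
  have hL : ((PySem.List.pyRange 0 m).map
        (fun j => min (pvPre hs (j.toNat + 1)) (pvSuf hs (j.toNat + 1))
          * (pvX s (j + 1) - pvX s j))).sum
      = ((PySem.List.pyRange 0 m).map
        (fun j => pvPre hs (j.toNat + 1) * (pvX s (j + 1) - pvX s j))).sum := by
    apply congrArg List.sum
    apply List.map_congr_left
    intro j hj
    obtain ⟨hj0, hjm⟩ := PySem.List.mem_pyRange_one.mp hj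
    rw [hminL (j.toNat + 1) (by omega)]
  have hR : ((PySem.List.pyRange m (PySem.List.len s - 1)).map
        (fun j => min (pvPre hs (j.toNat + 1)) (pvSuf hs (j.toNat + 1))
          * (pvX s (j + 1) - pvX s j))).sum
      = ((PySem.List.pyRange m (PySem.List.len s - 1)).map
        (fun j => pvSuf hs (j.toNat + 1) * (pvX s (j + 1) - pvX s j))).sum := by
    apply congrArg List.sum
    apply List.map_congr_left
    intro j hj
    obtain ⟨hjm, hjn⟩ := PySem.List.mem_pyRange_one.mp hj
    rw [hminR (j.toNat + 1) (by omega)]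
  rw [hL, hR, hHM]
  ring

-- ===== VERDICT (by name: the statement is the Claim_ definition above) =====
theorem smallest_warehouse_area_spec : Claim_equal_smallest_warehouse_area := by
  intro pillars _ hpre
  unfold Spec_smallest_warehouse_area
  rw [portA_eq, portB_eq]
  apply core
  intro hnil
  have := PySem.List.sorted2_perm pillars (fun p => p.1) (fun p => p.2) false
  rw [hnil] at this
  exact hpre (List.Perm.nil_eq this).symm
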